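-- pv_equiv track=rewrite | github.com/ZakMorrison2024/Disrello | disrello/disrello/parsing.py | _first_token_outside_quotes
-- ===== SOURCE A (Python) =====
-- from typing import Any, Dict, List, Optional, Tuple
--
-- def _first_token_outside_quotes(text: str) -> Optional[str]:
--     """Return first whitespace-delimited token, ignoring anything inside double quotes."""
--     if not text:
--         return None
--     i = 0
--     n = len(text)
--     while i < n and text[i].isspace():
--         i += 1
--     if i >= n:
--         return None
--     if text[i] == '"':
--         return None
--     j = i
--     while j < n and (not text[j].isspace()) and text[j] != '"':
--         j += 1
--     tok = text[i:j].strip()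
--     return tok or None
-- ===== SOURCE B (Python) =====
-- from typing import Optional
--
--
-- def _first_token_outside_quotes(text: str) -> Optional[str]:
--     """Return first whitespace-delimited token, ignoring anything inside double quotes."""
--     if not text:
--         return None
--     parts = text.split()
--     if not parts:
--         return None
--     tok = parts[0].split('"', 1)[0]
--     return tok or None
-- ===== Notes on version B (the rewrite author's own statement) =====
-- stated objective: simpler
-- what changed: Replaces A's fused index-based character scan (two while loops with manual bounds checks) by tokenizing with str.split() and truncating the first token at the first double quote with a second split.
import Mathlib
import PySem

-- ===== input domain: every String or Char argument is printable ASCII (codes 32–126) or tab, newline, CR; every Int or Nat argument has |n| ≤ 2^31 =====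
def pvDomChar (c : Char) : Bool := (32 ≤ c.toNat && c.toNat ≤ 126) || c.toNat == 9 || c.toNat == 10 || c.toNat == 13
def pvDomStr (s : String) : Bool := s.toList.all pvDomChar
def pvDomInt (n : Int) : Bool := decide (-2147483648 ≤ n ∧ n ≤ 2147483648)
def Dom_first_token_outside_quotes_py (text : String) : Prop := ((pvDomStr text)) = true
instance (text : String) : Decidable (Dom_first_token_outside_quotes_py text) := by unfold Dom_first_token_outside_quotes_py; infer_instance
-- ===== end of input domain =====

-- B replaces A's fused index-based character scan by str.split() tokenization plus a
-- second split at the first double quote (objective: simpler); return value only, no mutation.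

-- ===== PORT A =====
-- the first while loop: advance i over leading whitespace (the remaining suffix is the state)
def pvASkipWs : List Char → List Char
  | [] => []
  | c :: t => if PySem.Chars.isspace c then pvASkipWs t else c :: t

-- the second while loop: extend j while not whitespace and not '"'
def pvAScanTok : List Char → List Char
  | [] => []
  | c :: t => if !(PySem.Chars.isspace c) && c != '"' then c :: pvAScanTok t else []

def first_token_outside_quotes_py (text : String) : Option String :=
  if text.toList.isEmpty then none
  else
    match pvASkipWs text.toList with
    | [] => none
    | c :: rest =>
      if c = '"' then none
      else
        let tok := PySem.Chars.strip (pvAScanTok (c :: rest))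
        if tok.isEmpty then none else some (String.ofList tok)

-- ===== PORT B =====
def first_token_outside_quotes_py_alt (text : String) : Option String :=
  if text.toList.isEmpty then none
  else
    match PySem.Chars.split₀ text.toList with
    | [] => none
    | p :: _ =>
      -- parts[0].split('"', 1)[0]  (split with a non-empty separator never yields [])
      let tok := (PySem.Chars.splitOnMax p ['"'] 1).headD []
      if tok.isEmpty then none else some (String.ofList tok)

-- ===== PRECONDITION & SPEC =====
def Spec_first_token_outside_quotes_py (text : String) (out : Option String) : Prop := out = first_token_outside_quotes_py_alt text
instance (text : String) (out : Option String) : Decidable (Spec_first_token_outside_quotes_py text out) := by unfold Spec_first_token_outside_quotes_py; infer_instance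

-- ===== CLAIM (what is proved, stated in full; the proofs are below) =====
def Claim_equal_first_token_outside_quotes_py : Prop := ∀ (text : String), Dom_first_token_outside_quotes_py text → Spec_first_token_outside_quotes_py text (first_token_outside_quotes_py text)

-- ===== LEMMAS AND PROOFS =====

-- A's loops are dropWhile / takeWhile
theorem pvASkipWs_eq (cs : List Char) :
    pvASkipWs cs = cs.dropWhile PySem.Chars.isspace := by
  induction cs with
  | nil => rfl
  | cons c t ih => simp [pvASkipWs, List.dropWhile_cons]; split_ifs <;> simp_all

theorem pvAScanTok_eq (cs : List Char) :
    pvAScanTok cs = cs.takeWhile (fun c => !(PySem.Chars.isspace c) && c != '"') := by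
  induction cs with
  | nil => rfl
  | cons c t ih => simp only [pvAScanTok, List.takeWhile_cons]; split_ifs <;> simp_all

-- strip is the identity on a whitespace-free list
theorem strip_of_no_ws (cs : List Char) (h : ∀ c ∈ cs, PySem.Chars.isspace c = false) :
    PySem.Chars.strip cs = cs := by
  have hdrop : ∀ l : List Char, (∀ c ∈ l, PySem.Chars.isspace c = false) →
      l.dropWhile PySem.Chars.isspace = l := by
    intro l hl
    cases l with
    | nil => rfl
    | cons c t => simp [hl c (by simp)]
  simp [PySem.Chars.strip, PySem.Chars.lstrip, PySem.Chars.rstrip, hdrop cs h,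
    hdrop cs.reverse (by intro c hc; exact h c (List.mem_reverse.mp hc))]

-- ---- split₀ characterisation ----

theorem split0_go_acc (cs : List Char) : ∀ cur acc,
    PySem.Chars.split₀.go cs cur acc = acc.reverse ++ PySem.Chars.split₀.go cs cur [] := by
  induction cs with
  | nil =>
    intro cur acc
    simp [PySem.Chars.split₀.go]; split_ifs <;> simp
  | cons c t ih =>
    intro cur acc
    simp only [PySem.Chars.split₀.go]
    split_ifs with h1 h2
    · exact ih [] acc
    · rw [ih [] (cur.reverse :: acc), ih [] [cur.reverse]]
      simp
    · exact ih (c :: cur) acc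

theorem split0_go_head (cs : List Char) : ∀ cur : List Char,
    (cur ≠ [] ∨ ∃ c t, cs = c :: t ∧ PySem.Chars.isspace c = false) →
    ∃ tl, PySem.Chars.split₀.go cs cur [] =
      (cur.reverse ++ cs.takeWhile (fun c => !(PySem.Chars.isspace c))) :: tl := by
  induction cs with
  | nil =>
    intro cur h
    rcases h with h | ⟨c, t, h, _⟩
    · refine ⟨[], ?_⟩
      simp [PySem.Chars.split₀.go, List.isEmpty_eq_false_iff.mpr h]
    · simp at h
  | cons c t ih =>
    intro cur h
    by_cases hsp : PySem.Chars.isspace c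
    · -- current char is whitespace: cur must be non-empty
      have hcur : cur ≠ [] := by
        rcases h with h | ⟨c', t', he, hf⟩
        · exact h
        · rw [List.cons.injEq] at he
          rw [← he.1] at hf
          simp [hsp] at hf
      refine ⟨PySem.Chars.split₀.go t [] [], ?_⟩
      simp only [PySem.Chars.split₀.go, hsp, if_true, List.isEmpty_eq_false_iff.mpr hcur,
        Bool.false_eq_true, if_false]
      rw [split0_go_acc t [] [cur.reverse]]
      simp [hsp]
    · obtain ⟨tl, htl⟩ := ih (c :: cur) (Or.inl (by simp))
      refine ⟨tl, ?_⟩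
      simp only [PySem.Chars.split₀.go, hsp, Bool.false_eq_true, if_false]
      rw [htl]
      simp [hsp]

theorem split0_all_ws (cs : List Char) (h : ∀ c ∈ cs, PySem.Chars.isspace c = true) :
    PySem.Chars.split₀ cs = [] := by
  unfold PySem.Chars.split₀
  induction cs with
  | nil => rfl
  | cons c t ih =>
    simp only [PySem.Chars.split₀.go, h c (by simp), if_true, List.isEmpty_nil]
    exact ih (fun c hc => h c (by simp [hc]))

theorem split0_skip (cs : List Char) :
    PySem.Chars.split₀ cs = PySem.Chars.split₀ (cs.dropWhile PySem.Chars.isspace) := by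
  unfold PySem.Chars.split₀
  induction cs with
  | nil => rfl
  | cons c t ih =>
    by_cases hsp : PySem.Chars.isspace c
    · simp only [List.dropWhile_cons, hsp, if_true]
      rw [← ih]
      simp [PySem.Chars.split₀.go, hsp]
    · simp [hsp]

-- ---- splitOnMax head: chars before the first '"' ----

theorem splitOnMax_go_acc : ∀ (fuel : Nat) (m : Nat) (l cur : List Char) (acc : List (List Char)),
    PySem.Chars.splitOnMax.go ['"'] fuel m l cur acc
      = acc.reverse ++ PySem.Chars.splitOnMax.go ['"'] fuel m l cur [] := by
  intro fuel
  induction fuel with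
  | zero => intro m l cur acc; simp [PySem.Chars.splitOnMax.go]
  | succ f ih =>
    intro m l cur acc
    cases l with
    | nil => simp [PySem.Chars.splitOnMax.go]
    | cons c t =>
      simp only [PySem.Chars.splitOnMax.go]
      split_ifs with h1 h2
      · simp
      · rw [ih (m - 1) (List.drop (['"'].length) (c :: t)) [] (cur.reverse :: acc),
            ih (m - 1) (List.drop (['"'].length) (c :: t)) [] [cur.reverse]]
        simp
      · exact ih m t (c :: cur) acc

theorem splitOnMax_go_head : ∀ (fuel : Nat) (l cur : List Char), l.length < fuel →
    ∃ tl, PySem.Chars.splitOnMax.go ['"'] fuel 1 l cur []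
      = (cur.reverse ++ l.takeWhile (fun c => c != '"')) :: tl := by
  intro fuel
  induction fuel with
  | zero => intro l cur h; omega
  | succ f ih =>
    intro l cur h
    cases l with
    | nil => exact ⟨[], by simp [PySem.Chars.splitOnMax.go]⟩
    | cons c t =>
      by_cases hq : c = '"'
      · refine ⟨PySem.Chars.splitOnMax.go ['"'] f 0 (List.drop (['"'].length) (c :: t)) [] [], ?_⟩
        have hpref : List.isPrefixOf ['"'] (c :: t) = true := by
          simp [List.isPrefixOf, hq]
        simp only [PySem.Chars.splitOnMax.go, hpref, if_true]
        norm_num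
        rw [splitOnMax_go_acc f 0 t [] [cur.reverse]]
        simp [hq]
      · have hpref : List.isPrefixOf ['"'] (c :: t) = false := by
          simp [List.isPrefixOf]; exact fun h => absurd h.symm hq
        obtain ⟨tl, htl⟩ := ih t (c :: cur) (by simpa using Nat.lt_of_succ_lt_succ h)
        refine ⟨tl, ?_⟩
        simp only [PySem.Chars.splitOnMax.go, hpref, Bool.false_eq_true, if_false]
        norm_num
        rw [htl]
        simp [bne_iff_ne, hq]

theorem splitOnMax_head (p : List Char) :
    (PySem.Chars.splitOnMax p ['"'] 1).head?.getD [] = p.takeWhile (fun c => c != '"') := by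
  obtain ⟨tl, htl⟩ := splitOnMax_go_head (p.length + 1) p [] (by omega)
  unfold PySem.Chars.splitOnMax
  rw [if_neg (by norm_num)]
  norm_num
  rw [htl]
  simp

theorem dropWhile_head_false (cs : List Char) : ∀ (c : Char) (rest : List Char),
    cs.dropWhile PySem.Chars.isspace = c :: rest → PySem.Chars.isspace c = false := by
  induction cs with
  | nil => intro c rest h; simp at h
  | cons a t ih =>
    intro c rest h
    by_cases ha : PySem.Chars.isspace a
    · rw [List.dropWhile_cons_of_pos ha] at h; exact ih c rest h
    · rw [List.dropWhile_cons_of_neg ha] at h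
      rw [List.cons.injEq] at h
      rw [← h.1]
      simpa using ha

-- ===== VERDICT (by name: the statement is the Claim_ definition above) =====
theorem first_token_outside_quotes_py_spec : Claim_equal_first_token_outside_quotes_py := by
  intro text _
  unfold Spec_first_token_outside_quotes_py first_token_outside_quotes_py
    first_token_outside_quotes_py_alt
  by_cases h0 : text.toList.isEmpty
  · simp [h0]
  · rw [if_neg (by simp [h0]), if_neg (by simp [h0]), pvASkipWs_eq]
    rcases hws : text.toList.dropWhile PySem.Chars.isspace with _ | ⟨c, rest⟩
    · have hall : ∀ x ∈ text.toList, PySem.Chars.isspace x = true :=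
        List.dropWhile_eq_nil_iff.mp hws
      rw [split0_all_ws text.toList hall]
    · have hcsp : PySem.Chars.isspace c = false := dropWhile_head_false _ _ _ hws
      obtain ⟨tl, htl⟩ := split0_go_head (c :: rest) [] (Or.inr ⟨c, rest, rfl, hcsp⟩)
      have hsplit : PySem.Chars.split₀ text.toList
          = ((c :: rest).takeWhile (fun x => !(PySem.Chars.isspace x))) :: tl := by
        rw [split0_skip text.toList, hws]
        unfold PySem.Chars.split₀
        simpa using htl
      rw [hsplit]
      by_cases hq : c = '"'
      · subst hq
        have h1 : PySem.Chars.isspace '"' = false := by decide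
        simp [h1, splitOnMax_head]
      · have hstrip : PySem.Chars.strip (pvAScanTok (c :: rest))
            = (c :: rest).takeWhile (fun x => !(PySem.Chars.isspace x) && x != '"') := by
          rw [pvAScanTok_eq]
          apply strip_of_no_ws
          intro x hx
          have hxx := List.mem_takeWhile_imp hx
          simp only [Bool.and_eq_true, Bool.not_eq_true'] at hxx
          exact hxx.1
        simp [hstrip, splitOnMax_head, List.takeWhile_takeWhile, hcsp, hq]
        have hpred : (fun x : Char => !PySem.Chars.isspace x && x != '"')
            = (fun a : Char => !decide (a = '"') && !PySem.Chars.isspace a) := by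
          funext a
          by_cases ha : a = '"' <;> simp [ha, Bool.and_comm]
        rw [hpred]
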